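-- pv_equiv track=rewrite | github.com/lgtm-migrator/openapiart | openapiart/openapiartgo.py | _get_external_field_name
-- ===== SOURCE A (Python) =====
-- def _get_external_field_name(openapi_name):
--     external_name = ""
--     for piece in openapi_name.replace(".", "").split("_"):
--         for i in range(len(piece)):
--             if i == 0 and piece[i].isdigit() is False:
--                 external_name += piece[i].upper()
--             elif piece[i].isdigit():
--                 if "_" + piece[i] in openapi_name:
--                     external_name += "_" + piece[i]
--                 else:
--                     external_name += piece[i]
--             elif external_name[-1].isdigit():
--                 external_name += piece[i].upper()
--             else:
--                 external_name += piece[i]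
--     if external_name in ["String"]:
--         external_name += "_"
--     return external_name
-- ===== SOURCE B (Python) =====
-- def _get_external_field_name(openapi_name):
--     out = ""
--     word_start = True
--     for ch in openapi_name.replace(".", ""):
--         if ch == "_":
--             word_start = True
--         elif ch.isdigit():
--             out += ("_" + ch) if ("_" + ch in openapi_name) else ch
--             word_start = False
--         elif word_start or (out and out[-1].isdigit()):
--             out += ch.upper()
--             word_start = False
--         else:
--             out += ch
--             word_start = False
--     if out == "String":
--         out += "_"
--     return out
-- ===== Notes on version B (the rewrite author's own statement) =====
-- stated objective: simpler
-- what changed: B replaces A's two nested loops (outer over the pieces of splitting on underscore, inner indexing each piece via range(len)) by a single character-by-character scan of the dot-free string that carries a word-start flag and inspects the last emitted character.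
import Mathlib
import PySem

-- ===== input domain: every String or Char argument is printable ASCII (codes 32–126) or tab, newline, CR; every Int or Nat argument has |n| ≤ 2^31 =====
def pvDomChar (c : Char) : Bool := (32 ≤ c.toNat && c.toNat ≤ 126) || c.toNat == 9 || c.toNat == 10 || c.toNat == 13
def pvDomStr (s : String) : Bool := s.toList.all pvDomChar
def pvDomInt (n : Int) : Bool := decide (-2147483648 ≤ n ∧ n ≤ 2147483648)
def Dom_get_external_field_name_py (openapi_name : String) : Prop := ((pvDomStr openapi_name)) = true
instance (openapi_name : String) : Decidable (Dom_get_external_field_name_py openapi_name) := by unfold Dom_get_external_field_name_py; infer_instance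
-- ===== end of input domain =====

-- B replaces A's split-on-'_' double loop by a single left-to-right scan of the dot-free
-- string that carries a word-start flag; objective: simpler (one pass, no intermediate piece list).

-- ===== PORT A =====
-- one step of A's inner loop body: ic = (i, piece[i]); 'external_name[-1]' is read with
-- default ' ' — the branch is only reached with external_name nonempty, where pyGetD = the Python value
def pvAstep (name ext : List Char) (ic : Int × Char) : List Char :=
  if ic.1 == 0 && PySem.Chars.isdigit ic.2 == false then ext ++ [PySem.Chars.upperChar ic.2]
  else if PySem.Chars.isdigit ic.2 then
    (if PySem.Chars.isIn ['_', ic.2] name then ext ++ ['_', ic.2] else ext ++ [ic.2])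
  else if PySem.Chars.isdigit (PySem.List.pyGetD ext (-1) ' ') then ext ++ [PySem.Chars.upperChar ic.2]
  else ext ++ [ic.2]

def get_external_field_name_py (openapi_name : String) : String :=
  let name := openapi_name.toList
  let ext := (PySem.Chars.splitOn (PySem.Chars.replace name ['.'] []) ['_']).foldl
      (fun ext piece => (PySem.List.enumerate piece).foldl (pvAstep name) ext) []
  String.ofList (if ext = "String".toList then ext ++ ['_'] else ext)

-- ===== PORT B =====
-- one step of B's scan: state = (out, word_start); '(out and out[-1].isdigit())' reads the last
-- emitted char (False on empty out, = pyGetD out (-1) ' ' which is a non-digit when empty)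
def pvBstep (name : List Char) (st : List Char × Bool) (c : Char) : List Char × Bool :=
  if c == '_' then (st.1, true)
  else if PySem.Chars.isdigit c then
    ((if PySem.Chars.isIn ['_', c] name then st.1 ++ ['_', c] else st.1 ++ [c]), false)
  else if st.2 || (!st.1.isEmpty && PySem.Chars.isdigit (PySem.List.pyGetD st.1 (-1) ' ')) then
    (st.1 ++ [PySem.Chars.upperChar c], false)
  else (st.1 ++ [c], false)

def get_external_field_name_py_alt (openapi_name : String) : String :=
  let name := openapi_name.toList
  let ext := ((PySem.Chars.replace name ['.'] []).foldl (pvBstep name) ([], true)).1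
  String.ofList (if ext = "String".toList then ext ++ ['_'] else ext)

-- ===== PRECONDITION & SPEC =====
def Spec_get_external_field_name_py (openapi_name : String) (out : String) : Prop := out = get_external_field_name_py_alt openapi_name
instance (openapi_name : String) (out : String) : Decidable (Spec_get_external_field_name_py openapi_name out) := by unfold Spec_get_external_field_name_py; infer_instance

-- ===== CLAIM (what is proved, stated in full; the proofs are below) =====
def Claim_equal_get_external_field_name_py : Prop := ∀ (openapi_name : String), Dom_get_external_field_name_py openapi_name → Spec_get_external_field_name_py openapi_name (get_external_field_name_py openapi_name)

-- ===== LEMMAS AND PROOFS =====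

-- A's inner-loop step at an index i ≥ 1 (the 'i == 0' branch is dead)
def pvPos (name ext : List Char) (c : Char) : List Char :=
  if PySem.Chars.isdigit c then
    (if PySem.Chars.isIn ['_', c] name then ext ++ ['_', c] else ext ++ [c])
  else if PySem.Chars.isdigit (PySem.List.pyGetD ext (-1) ' ') then ext ++ [PySem.Chars.upperChar c]
  else ext ++ [c]

-- structural model of splitOn · ['_']
def pvSplit : List Char → List (List Char)
  | [] => [[]]
  | c :: t => if c = '_' then [] :: pvSplit t
              else (c :: (pvSplit t).headI) :: (pvSplit t).tail

def pvConsHead (x : List Char) : List (List Char) → List (List Char)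
  | [] => [x]
  | p :: ps => (x ++ p) :: ps

lemma pvSplit_ne_nil (l : List Char) : pvSplit l ≠ [] := by
  cases l with
  | nil => simp [pvSplit]
  | cons c t => by_cases h : c = '_' <;> simp [pvSplit, h]

lemma pvGo_spec (l cur : List Char) (acc : List (List Char)) (fuel : Nat)
    (h : l.length < fuel) :
    PySem.Chars.splitOn.go ['_'] fuel l cur acc
      = acc.reverse ++ pvConsHead cur.reverse (pvSplit l) := by
  induction l generalizing cur acc fuel with
  | nil =>
      cases fuel with
      | zero => omega
      | succ f => rw [PySem.Chars.splitOn.go.eq_def]; simp [pvSplit, pvConsHead]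
  | cons c t ih =>
      cases fuel with
      | zero => omega
      | succ f =>
        rw [PySem.Chars.splitOn.go.eq_def]
        by_cases hc : c = '_'
        · subst hc
          have hpre : List.isPrefixOf ['_'] ('_' :: t) = true := by
            simp [List.isPrefixOf]
          simp only [hpre, if_pos]
          rw [show List.drop ['_'].length ('_' :: t) = t from rfl]
          rw [ih [] (List.reverse cur :: acc) f (by simpa using Nat.lt_of_succ_lt_succ h)]
          rcases hsp : pvSplit t with _ | ⟨p, ps⟩
          · exact absurd hsp (pvSplit_ne_nil t)
          · simp [pvSplit, pvConsHead, hsp]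
        · have hpre : List.isPrefixOf ['_'] (c :: t) = false := by
            simp only [List.isPrefixOf, Bool.and_eq_false_imp]
            simp [Ne.symm hc]
          simp only [hpre, Bool.false_eq_true, if_false]
          rw [ih (c :: cur) acc f (by simpa using Nat.lt_of_succ_lt_succ h)]
          rcases hsp : pvSplit t with _ | ⟨p, ps⟩
          · exact absurd hsp (pvSplit_ne_nil t)
          · simp [pvSplit, pvConsHead, hsp, hc]

lemma pvSplitOn_eq (l : List Char) : PySem.Chars.splitOn l ['_'] = pvSplit l := by
  have := pvGo_spec l [] [] (l.length + 1) (by omega)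
  rcases hsp : pvSplit l with _ | ⟨p, ps⟩
  · exact absurd hsp (pvSplit_ne_nil l)
  · simpa [PySem.Chars.splitOn, pvConsHead, hsp] using this

-- A's inner loop over one piece
def pvInner (name : List Char) (ext piece : List Char) : List Char :=
  (PySem.List.enumerate piece).foldl (pvAstep name) ext

lemma pvAstep_pos (name ext : List Char) (i : Int) (c : Char) (hi : i ≠ 0) :
    pvAstep name ext (i, c) = pvPos name ext c := by
  simp [pvAstep, pvPos, hi]

lemma pvEnum_pos (name : List Char) (p : List Char) (k : Int) (hk : 1 ≤ k) (ext : List Char) :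
    (PySem.List.enumerate p k).foldl (pvAstep name) ext = p.foldl (pvPos name) ext := by
  induction p generalizing k ext with
  | nil => simp [PySem.List.enumerate]
  | cons c t ih =>
      simp only [PySem.List.enumerate, List.foldl_cons]
      rw [pvAstep_pos name ext k c (by omega), ih (k + 1) (by omega)]

lemma pvInner_nil (name ext : List Char) : pvInner name ext [] = ext := by
  simp [pvInner, PySem.List.enumerate]

lemma pvInner_cons (name ext : List Char) (c : Char) (p : List Char) :
    pvInner name ext (c :: p) = p.foldl (pvPos name) (pvAstep name ext (0, c)) := by
  simp only [pvInner, PySem.List.enumerate, List.foldl_cons]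
  exact pvEnum_pos name p 1 (by omega) _

lemma pvBstep_start (name ext : List Char) (c : Char) (hc : c ≠ '_') :
    pvBstep name (ext, true) c = (pvAstep name ext (0, c), false) := by
  by_cases hd : PySem.Chars.isdigit c <;>
    simp [pvBstep, pvAstep, hc, hd]

lemma pvBstep_mid (name ext : List Char) (c : Char) (hc : c ≠ '_') :
    pvBstep name (ext, false) c = (pvPos name ext c, false) := by
  have h0 : PySem.List.pyGetD ([] : List Char) (-1) ' ' = ' ' := by decide
  have hsp : PySem.Chars.isdigit ' ' = false := by decide
  rcases hext : ext with _ | ⟨e, es⟩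
  · by_cases hd : PySem.Chars.isdigit c <;>
      simp [pvBstep, pvPos, hc, hd, h0, hsp]
  · by_cases hd : PySem.Chars.isdigit c <;>
      simp [pvBstep, pvPos, hc, hd]
    · split_ifs <;> rfl

-- main correspondence: B's scan with word_start=true computes A's fold over the pieces,
-- and with word_start=false it continues inside the first piece
lemma pvScan_eq (name l : List Char) : ∀ acc : List Char,
    (l.foldl (pvBstep name) (acc, true)).1 = (pvSplit l).foldl (pvInner name) acc
    ∧ (l.foldl (pvBstep name) (acc, false)).1
        = (pvSplit l).tail.foldl (pvInner name) ((pvSplit l).headI.foldl (pvPos name) acc) := by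
  induction l with
  | nil => intro acc; simp [pvSplit, pvInner_nil]
  | cons c t ih =>
      intro acc
      by_cases hc : c = '_'
      · subst hc
        have hstep : ∀ b, pvBstep name (acc, b) '_' = (acc, true) := by
          intro b; simp [pvBstep]
        rcases hsp : pvSplit t with _ | ⟨p, ps⟩
        · exact absurd hsp (pvSplit_ne_nil t)
        · constructor
          · simp only [List.foldl_cons, hstep, pvSplit, hsp]
            have := (ih acc).1
            rw [hsp] at this
            simpa [pvInner_nil] using this
          · simp only [List.foldl_cons, hstep, pvSplit, hsp]
            have := (ih acc).1
            rw [hsp] at this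
            simpa [pvInner_nil] using this
      · rcases hsp : pvSplit t with _ | ⟨p, ps⟩
        · exact absurd hsp (pvSplit_ne_nil t)
        · constructor
          · rw [List.foldl_cons, pvBstep_start name acc c hc]
            have := (ih (pvAstep name acc (0, c))).2
            rw [hsp] at this
            simp only [pvSplit, hc, if_false, hsp, List.foldl_cons]
            simpa [pvInner_cons] using this
          · rw [List.foldl_cons, pvBstep_mid name acc c hc]
            have := (ih (pvPos name acc c)).2
            rw [hsp] at this
            simp only [pvSplit, hc, if_false, hsp]
            simpa using this

-- ===== VERDICT (by name: the statement is the Claim_ definition above) =====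
theorem get_external_field_name_py_spec : Claim_equal_get_external_field_name_py := by
  intro openapi_name _
  unfold Spec_get_external_field_name_py
  simp only [get_external_field_name_py, get_external_field_name_py_alt]
  rw [(pvScan_eq openapi_name.toList (PySem.Chars.replace openapi_name.toList ['.'] []) []).1]
  rw [pvSplitOn_eq]
  rfl
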